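-- pv_equiv track=rewrite | github.com/GunnerLab/MCCE4-Tools | mcce4_tools/mcce4/topn_cms_to_pdbs.py | non_canonical_text
-- ===== SOURCE A (Python) =====
-- def non_canonical_text(nc_dict: dict) -> str:
--     """Return the formated data from get_non_canonical_dict as string."""
--     if nc_dict:
--         all_res = ""
--         # for wrapping lines:
--         k_max = len(max(nc_dict))
--         ends = ["; ", ";\n " + " " * k_max]
--         n_cols = 9
--
--         for k in nc_dict:
--             if nc_dict[k].get("residues") is not None:
--                 res = ""
--                 for i, v in enumerate(nc_dict[k]["residues"], start=1):
--                     end = ends[int(i % n_cols == 0)]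
--                     res = res + f"{v[0]}:{v[1]}{end}"
--                 all_res += f"{k: >{k_max}} {res}\n"
--             else:
--                 all_res = "None"
--     else:
--         all_res = "None"
--
--     return all_res
-- ===== SOURCE B (Python) =====
-- def non_canonical_text(nc_dict: dict) -> str:
--     """Return the formated data from get_non_canonical_dict as string."""
--     if not nc_dict:
--         return "None"
--     all_res = ""
--     k_max = len(max(nc_dict))
--     newsep = ";\n " + " " * k_max
--     for k in nc_dict:
--         residues = nc_dict[k].get("residues")
--         if residues is None:
--             all_res = "None"
--             continue
--         cells = [f"{a}:{b}" for a, b in residues]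
--         chunks = []
--         rest = cells
--         while rest:
--             chunks.append(rest[:9])
--             rest = rest[9:]
--         res = newsep.join("; ".join(chunk) for chunk in chunks)
--         if cells:
--             res += newsep if len(cells) % 9 == 0 else "; "
--         all_res += f"{k: >{k_max}} {res}\n"
--     return all_res
-- ===== Notes on version B (the rewrite author's own statement) =====
-- stated objective: alternative
-- what changed: The per-element enumerate/modulo loop that interleaves a separator after every cell is replaced by a chunking decomposition: build the cell strings, split them into rows of 9, join rows with '; ' and join the rows with the newline separator, then append the single trailing separator once.
import Mathlib
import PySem

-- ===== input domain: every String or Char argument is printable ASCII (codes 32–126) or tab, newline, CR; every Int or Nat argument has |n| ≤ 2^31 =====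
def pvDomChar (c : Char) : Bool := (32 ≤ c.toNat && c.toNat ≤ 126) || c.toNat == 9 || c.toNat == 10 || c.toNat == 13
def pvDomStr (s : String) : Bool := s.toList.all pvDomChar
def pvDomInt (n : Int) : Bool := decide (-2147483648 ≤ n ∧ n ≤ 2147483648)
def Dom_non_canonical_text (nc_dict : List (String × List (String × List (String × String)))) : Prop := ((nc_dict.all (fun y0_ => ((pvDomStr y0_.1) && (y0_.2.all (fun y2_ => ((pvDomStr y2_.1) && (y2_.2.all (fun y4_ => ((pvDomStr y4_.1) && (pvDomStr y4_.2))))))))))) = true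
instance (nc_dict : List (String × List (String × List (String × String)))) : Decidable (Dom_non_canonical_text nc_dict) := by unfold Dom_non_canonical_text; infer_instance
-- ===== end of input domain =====

-- B replaces A's enumerate/modulo interleaving of separators by chunk-of-9 rows joined once
-- (objective: alternative decomposition, same cost).

-- f"{k: >{k_max}}" : right-justify with spaces to width w (no truncation) — exact for ASCII
def nct_rjust (k : String) (w : Nat) : String :=
  String.mk (List.replicate (w - k.toList.length) ' ') ++ k

-- ===== PORT A =====
-- A's inner 'for i, v in enumerate(..., start=1)' loop; ends = (ends[0], ends[1])
def nct_loopA (ends : String × String) (res : String) (i : Nat) :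
    List (String × String) → String
  | [] => res
  | v :: t =>
      nct_loopA ends
        (res ++ (v.1 ++ ":" ++ v.2 ++ (if i % 9 == 0 then ends.2 else ends.1)))
        (i + 1) t

def non_canonical_text (nc_dict : List (String × List (String × List (String × String)))) : String :=
  if nc_dict = [] then "None"
  else
    let d := PySem.Dict.ofList nc_dict
    match PySem.List.max? d.keys (fun s => s) with
    | none => "None"  -- unreachable: the dict is non-empty
    | some mx =>
      let k_max := mx.toList.length
      let ends : String × String := ("; ", ";\n " ++ String.mk (List.replicate k_max ' '))
      d.items.foldl (fun all_res kv =>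
        match (PySem.Dict.ofList kv.2).get? "residues" with
        | some residues =>
            all_res ++ (nct_rjust kv.1 k_max ++ " " ++ nct_loopA ends "" 1 residues ++ "\n")
        | none => "None") ""

-- ===== PORT B =====
-- str.join, ported by hand (exact)
def nct_join (sep : String) : List String → String
  | [] => ""
  | [x] => x
  | x :: y :: t => x ++ sep ++ nct_join sep (y :: t)

-- the 'while rest: chunks.append(rest[:9]); rest = rest[9:]' loop
def nct_chunks9 : List String → List (List String)
  | [] => []
  | x :: t => (x :: t).take 9 :: nct_chunks9 ((x :: t).drop 9)
  termination_by l => l.length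
  decreasing_by simp

def nct_render (newsep : String) (cells : List String) : String :=
  let body := nct_join newsep ((nct_chunks9 cells).map (fun ch => nct_join "; " ch))
  if cells.isEmpty then body
  else body ++ (if cells.length % 9 == 0 then newsep else "; ")

def non_canonical_text_alt (nc_dict : List (String × List (String × List (String × String)))) : String :=
  if nc_dict = [] then "None"
  else
    let d := PySem.Dict.ofList nc_dict
    match PySem.List.max? d.keys (fun s => s) with
    | none => "None"  -- unreachable: the dict is non-empty
    | some mx =>
      let k_max := mx.toList.length
      let newsep := ";\n " ++ String.mk (List.replicate k_max ' ')
      d.items.foldl (fun all_res kv =>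
        match (PySem.Dict.ofList kv.2).get? "residues" with
        | some residues =>
            all_res ++ (nct_rjust kv.1 k_max ++ " " ++
              nct_render newsep (residues.map (fun v => v.1 ++ ":" ++ v.2)) ++ "\n")
        | none => "None") ""

-- ===== PRECONDITION & SPEC =====
def Spec_non_canonical_text (nc_dict : List (String × List (String × List (String × String)))) (out : String) : Prop := out = non_canonical_text_alt nc_dict
instance (nc_dict : List (String × List (String × List (String × String)))) (out : String) : Decidable (Spec_non_canonical_text nc_dict out) := by unfold Spec_non_canonical_text; infer_instance

-- ===== CLAIM (what is proved, stated in full; the proofs are below) =====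
def Claim_equal_non_canonical_text : Prop := ∀ (nc_dict : List (String × List (String × List (String × String)))), Dom_non_canonical_text nc_dict → Spec_non_canonical_text nc_dict (non_canonical_text nc_dict)

-- ===== LEMMAS AND PROOFS =====

theorem nct_chunks9_nil : nct_chunks9 [] = [] := by rw [nct_chunks9]

theorem nct_chunks9_cons (x : String) (t : List String) :
    nct_chunks9 (x :: t) = (x :: t).take 9 :: nct_chunks9 ((x :: t).drop 9) := by
  rw [nct_chunks9]

theorem nct_chunks9_ne_nil (l : List String) (h : l ≠ []) : nct_chunks9 l ≠ [] := by
  cases l with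
  | nil => exact absurd rfl h
  | cons x t => rw [nct_chunks9_cons]; simp

theorem nct_loopA_prefix (e : String × String) (l : List (String × String)) :
    ∀ (res : String) (i : Nat), nct_loopA e res i l = res ++ nct_loopA e "" i l := by
  induction l with
  | nil => intro res i; simp [nct_loopA]
  | cons v t ih =>
      intro res i
      simp only [nct_loopA]
      rw [ih, ih ("" ++ _), String.empty_append, String.append_assoc]

theorem nct_loopA_shift (e : String × String) (l : List (String × String)) :
    ∀ (res : String) (i : Nat), nct_loopA e res (i + 9) l = nct_loopA e res i l := by
  induction l with
  | nil => intro res i; simp [nct_loopA]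
  | cons v t ih =>
      intro res i
      simp only [nct_loopA, Nat.add_mod_right]
      have : i + 9 + 1 = (i + 1) + 9 := by omega
      rw [this, ih]

theorem nct_join_cons (sep x : String) (xs : List String) (h : xs ≠ []) :
    nct_join sep (x :: xs) = x ++ sep ++ nct_join sep xs := by
  cases xs with
  | nil => exact absurd rfl h
  | cons y t => simp [nct_join]

theorem nct_foldl_fun_congr {α β : Type} (f g : α → β → α) (h : ∀ a b, f a b = g a b)
    (init : α) (l : List β) : l.foldl f init = l.foldl g init := by
  induction l generalizing init with
  | nil => rfl
  | cons b t ih => simp only [List.foldl_cons, h]; exact ih _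

theorem nct_render_peel (e1 c1 c2 c3 c4 c5 c6 c7 c8 c9 : String) (mr : List String)
    (h : mr ≠ []) :
    nct_render e1 (c1 :: c2 :: c3 :: c4 :: c5 :: c6 :: c7 :: c8 :: c9 :: mr)
      = c1 ++ "; " ++ c2 ++ "; " ++ c3 ++ "; " ++ c4 ++ "; " ++ c5 ++ "; " ++ c6 ++ "; "
          ++ c7 ++ "; " ++ c8 ++ "; " ++ c9 ++ e1 ++ nct_render e1 mr := by
  unfold nct_render
  rw [nct_chunks9_cons]
  have htail : (nct_chunks9 ((c1 :: c2 :: c3 :: c4 :: c5 :: c6 :: c7 :: c8 :: c9 :: mr).drop 9)).map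
      (fun ch => nct_join "; " ch) ≠ [] := by
    simp only [List.drop_succ_cons, List.drop_zero, ne_eq, List.map_eq_nil_iff]
    exact nct_chunks9_ne_nil mr h
  rw [List.map_cons, nct_join_cons _ _ _ htail]
  simp [nct_join, h, String.append_assoc]
  have h9 : (mr.length + 1 + 1 + 1 + 1 + 1 + 1 + 1 + 1 + 1) % 9 = mr.length % 9 := by omega
  rw [h9]

-- the heart of the equivalence: A's interleaving loop = B's chunk rendering
theorem nct_main (e1 : String) : ∀ (n : Nat) (l : List (String × String)), l.length ≤ n →
    nct_loopA ("; ", e1) "" 1 l = nct_render e1 (l.map (fun v => v.1 ++ ":" ++ v.2)) := by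
  intro n
  induction n using Nat.strong_induction_on with
  | _ n ih =>
    intro l hlen
    rcases l with _ | ⟨v1, _ | ⟨v2, _ | ⟨v3, _ | ⟨v4, _ | ⟨v5, _ | ⟨v6, _ | ⟨v7, _ | ⟨v8, _ | ⟨v9, rest⟩⟩⟩⟩⟩⟩⟩⟩⟩
    all_goals try (
      simp [nct_loopA, nct_render, nct_chunks9_nil, nct_chunks9_cons, nct_join,
        String.append_assoc, String.empty_append]
      done)
    -- remaining case: l = v1 :: … :: v9 :: rest
    by_cases hrest : rest = []
    · subst hrest
      simp [nct_loopA, nct_render, nct_chunks9_nil, nct_chunks9_cons, nct_join,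
        String.append_assoc, String.empty_append]
    · -- ≥ 10 elements: peel one chunk of 9 and recurse
      have hlt : rest.length < n := by simp at hlen; omega
      have hih := ih rest.length hlt rest le_rfl
      simp only [nct_loopA]
      norm_num
      rw [nct_loopA_prefix]
      have h10 : (10 : Nat) = 1 + 9 := by norm_num
      rw [h10, nct_loopA_shift, hih]
      have hmr : rest.map (fun v => v.1 ++ ":" ++ v.2) ≠ [] := by
        simpa using hrest
      rw [nct_render_peel _ _ _ _ _ _ _ _ _ _ _ hmr]
      simp [String.append_assoc]

-- ===== VERDICT (by name: the statement is the Claim_ definition above) =====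
theorem non_canonical_text_spec : Claim_equal_non_canonical_text := by
  intro nc _hdom
  unfold Spec_non_canonical_text non_canonical_text non_canonical_text_alt
  by_cases h : nc = []
  · simp [h]
  · simp only [if_neg h]
    cases hmx : PySem.List.max? (PySem.Dict.ofList nc).keys (fun s => s) with
    | none => rfl
    | some mx =>
        refine nct_foldl_fun_congr _ _ (fun all_res kv => ?_) _ _
        cases hres : (PySem.Dict.ofList kv.2).get? "residues" with
        | none => rfl
        | some residues =>
            simp only
            rw [nct_main _ residues.length residues le_rfl]
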